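-- pv_equiv track=rewrite | github.com/Harsha1704/AI_Resume_Analyzer_Job_Match_System | backend/services/job_matcher.py | _skill_prefilter
-- ===== SOURCE A (Python) =====
-- def _skill_prefilter(rows: list, resume_skills: list, jd_col, sk_col, top_n=150) -> list:
--     """
--     Cheap string-match pre-filter. Keeps only rows with at least 1 skill overlap.
--     Sorts by overlap count descending and returns top_n.
--     This avoids encoding rows that have zero relevance.
--     """
--     if not resume_skills:
--         return rows[:top_n]
--
--     scored = []
--     skills_lower = [s.lower() for s in resume_skills]
--
--     for row in rows:
--         jd_text = (
--             str(row.get(jd_col, "")) + " " + str(row.get(sk_col, ""))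
--         ).lower()
--         overlap = sum(1 for s in skills_lower if s in jd_text)
--         if overlap > 0:
--             scored.append((overlap, row))
--
--     scored.sort(key=lambda x: x[0], reverse=True)
--     result = [r for _, r in scored[:top_n]]
--
--     # If not enough overlap matches, pad with first rows
--     if len(result) < 5:
--         result = rows[:top_n]
--
--     return result
-- ===== SOURCE B (Python) =====
-- def _skill_prefilter(rows: list, resume_skills: list, jd_col, sk_col, top_n=150) -> list:
--     """Transposed scoring + sortless selection: texts are built once, then the loop
--     nesting is swapped (outer loop over skills incrementing a per-row counter array),
--     and the ordered result comes from one sweep per count from highest to lowest."""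
--     if not resume_skills:
--         return rows[:top_n]
--
--     texts = [
--         (str(row.get(jd_col, "")) + " " + str(row.get(sk_col, ""))).lower()
--         for row in rows
--     ]
--
--     counts = [0] * len(rows)
--     for s in resume_skills:
--         sl = s.lower()
--         for i in range(len(texts)):
--             if sl in texts[i]:
--                 counts[i] += 1
--
--     result = []
--     for k in range(len(resume_skills), 0, -1):
--         for i in range(len(rows)):
--             if counts[i] == k:
--                 result.append(rows[i])
--
--     result = result[:top_n]
--     if len(result) < 5:
--         result = rows[:top_n]
--     return result
-- ===== Notes on version B (the rewrite author's own statement) =====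
-- stated objective: alternative
-- what changed: Transposes the scoring double loop (outer loop over skills incrementing a per-row counter array over pre-built lowercased texts, instead of per-row overlap sums) and replaces the build-tuples-and-stable-sort pipeline with a sortless selection: one sweep per possible count from highest to lowest collects rows in scan order.
import Mathlib
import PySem

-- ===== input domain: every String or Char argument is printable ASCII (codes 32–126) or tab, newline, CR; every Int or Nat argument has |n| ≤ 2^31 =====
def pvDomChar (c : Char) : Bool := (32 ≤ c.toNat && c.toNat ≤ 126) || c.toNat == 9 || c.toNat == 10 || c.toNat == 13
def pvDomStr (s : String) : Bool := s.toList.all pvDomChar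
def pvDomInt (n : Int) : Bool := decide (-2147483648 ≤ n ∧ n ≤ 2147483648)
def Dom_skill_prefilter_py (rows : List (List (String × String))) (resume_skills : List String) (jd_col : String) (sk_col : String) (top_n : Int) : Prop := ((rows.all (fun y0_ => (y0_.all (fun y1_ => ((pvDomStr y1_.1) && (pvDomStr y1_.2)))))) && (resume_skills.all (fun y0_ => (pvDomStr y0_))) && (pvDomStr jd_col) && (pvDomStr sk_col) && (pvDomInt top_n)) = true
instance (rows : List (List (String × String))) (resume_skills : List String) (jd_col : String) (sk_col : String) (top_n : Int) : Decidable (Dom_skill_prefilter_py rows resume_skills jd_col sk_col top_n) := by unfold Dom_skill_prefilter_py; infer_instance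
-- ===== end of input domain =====

-- B transposes A's scoring loop (outer loop over skills incrementing a per-row counter array over
-- pre-built texts) and replaces the build-tuples-and-stable-sort pipeline with a sortless
-- descending selection sweep; objective: alternative (same asymptotic scoring cost, no sort).

-- ===== PORT A =====
def skill_prefilter_py (rows : List (List (String × String))) (resume_skills : List String) (jd_col : String) (sk_col : String) (top_n : Int) : List (List (String × String)) :=
  if resume_skills = [] then PySem.List.slice rows none (some top_n)
  else
    let skills_lower := resume_skills.map (fun s => PySem.Chars.lower s.toList)
    let scored := rows.foldl (fun acc row =>
      let jd_text := PySem.Chars.lower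
        (((PySem.Dict.mk row).getD jd_col "").toList ++ (' ' :: ((PySem.Dict.mk row).getD sk_col "").toList))
      let overlap := (skills_lower.map (fun s => if PySem.Chars.isIn s jd_text then (1 : Int) else 0)).sum
      if 0 < overlap then acc ++ [(overlap, row)] else acc) []
    let sortedScored := PySem.List.sorted scored (fun x => x.1) true
    let result := (PySem.List.slice sortedScored none (some top_n)).map (fun p => p.2)
    if result.length < 5 then PySem.List.slice rows none (some top_n) else result

-- ===== PORT B =====
def skill_prefilter_py_alt (rows : List (List (String × String))) (resume_skills : List String) (jd_col : String) (sk_col : String) (top_n : Int) : List (List (String × String)) :=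
  if resume_skills = [] then PySem.List.slice rows none (some top_n)
  else
    let texts := rows.map (fun row => PySem.Chars.lower
      (((PySem.Dict.mk row).getD jd_col "").toList ++ (' ' :: ((PySem.Dict.mk row).getD sk_col "").toList)))
    -- 'for i in range(len(texts)): counts[i] += …' ported as the element-wise update of counts
    let counts := resume_skills.foldl (fun cs s =>
      let sl := PySem.Chars.lower s.toList
      (texts.zip cs).map (fun p => if PySem.Chars.isIn sl p.1 then p.2 + 1 else p.2))
      (List.replicate rows.length (0 : Int))
    let result0 := (PySem.List.pyRange (resume_skills.length : Int) 0 (-1)).foldl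
      (fun acc k => (rows.zip counts).foldl
        (fun acc2 p => if p.2 = k then acc2 ++ [p.1] else acc2) acc) []
    let result := PySem.List.slice result0 none (some top_n)
    if result.length < 5 then PySem.List.slice rows none (some top_n) else result

-- ===== PRECONDITION & SPEC =====
def Spec_skill_prefilter_py (rows : List (List (String × String))) (resume_skills : List String) (jd_col : String) (sk_col : String) (top_n : Int) (out : List (List (String × String))) : Prop := out = skill_prefilter_py_alt rows resume_skills jd_col sk_col top_n
instance (rows : List (List (String × String))) (resume_skills : List String) (jd_col : String) (sk_col : String) (top_n : Int) (out : List (List (String × String))) : Decidable (Spec_skill_prefilter_py rows resume_skills jd_col sk_col top_n out) := by unfold Spec_skill_prefilter_py; infer_instance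

-- ===== CLAIM (what is proved, stated in full; the proofs are below) =====
def Claim_equal_skill_prefilter_py : Prop := ∀ (rows : List (List (String × String))) (resume_skills : List String) (jd_col : String) (sk_col : String) (top_n : Int), Dom_skill_prefilter_py rows resume_skills jd_col sk_col top_n → Spec_skill_prefilter_py rows resume_skills jd_col sk_col top_n (skill_prefilter_py rows resume_skills jd_col sk_col top_n)

-- ===== LEMMAS AND PROOFS =====

-- the per-text overlap count summed over the skills
def pvG (skills : List String) (t : List Char) : Int :=
  ((skills.map (fun s => PySem.Chars.lower s.toList)).map
    (fun s => if PySem.Chars.isIn s t then (1 : Int) else 0)).sum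

-- zipping texts with a map over the same zip refolds into one map
theorem pv_zip_map_zip {α β γ : Type} (h : α × β → γ) (texts : List α) (cs : List β)
    (hlen : cs.length = texts.length) :
    texts.zip ((texts.zip cs).map h) = (texts.zip cs).map (fun p => (p.1, h p)) := by
  induction texts generalizing cs with
  | nil => simp
  | cons t texts ih =>
    cases cs with
    | nil => simp at hlen
    | cons c cs => simp_all

-- B's transposed counting fold computes, per position, the initial value plus the overlap count
theorem pv_counts_eq (skills : List String) (texts : List (List Char)) (init : List Int)
    (hlen : init.length = texts.length) :
    skills.foldl (fun cs s =>
        let sl := PySem.Chars.lower s.toList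
        (texts.zip cs).map (fun p => if PySem.Chars.isIn sl p.1 then p.2 + 1 else p.2)) init
      = (texts.zip init).map (fun p => p.2 + pvG skills p.1) := by
  induction skills generalizing init with
  | nil =>
    simp only [List.foldl_nil, pvG, List.map_nil, List.sum_nil, add_zero]
    exact (List.map_snd_zip (le_of_eq hlen)).symm
  | cons s skills ih =>
    simp only [List.foldl_cons]
    rw [ih _ (by simp [hlen]),
        pv_zip_map_zip _ _ _ hlen, List.map_map]
    refine List.map_congr_left ?_
    intro p _
    simp only [Function.comp_apply, pvG, List.map_cons, List.sum_cons]
    split_ifs <;> ring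

theorem pv_zip_replicate {α : Type} (l : List α) (c : Int) :
    l.zip (List.replicate l.length c) = l.map (fun t => (t, c)) := by
  induction l with
  | nil => rfl
  | cons x l ih => simpa [List.replicate_succ] using ih

-- insertBy passes over a block it is nowhere inserted before
theorem pv_insertBy_append {α : Type} (before : α → α → Bool) (x : α) (ys zs : List α)
    (h : ∀ y ∈ ys, before x y = false) :
    PySem.List.insertBy before x (ys ++ zs) = ys ++ PySem.List.insertBy before x zs := by
  induction ys with
  | nil => simp
  | cons y ys ih =>
    have hy : before x y = false := h y (by simp)
    simp [PySem.List.insertBy, hy, ih (fun y hy => h y (by simp [hy]))]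

-- insertBy lands in front of a block it goes before everywhere
theorem pv_insertBy_front {α : Type} (before : α → α → Bool) (x : α) (zs : List α)
    (h : ∀ z ∈ zs, before x z = true) :
    PySem.List.insertBy before x zs = x :: zs := by
  cases zs with
  | nil => simp [PySem.List.insertBy]
  | cons z zs => simp [PySem.List.insertBy, h z (by simp)]

-- inserting an element whose key is one of the strictly descending bucket keys appends it to its bucket
theorem pv_insertBy_flatMap {ρ : Type} (ks : List Int) (hks : ks.Pairwise (fun a b => b < a))
    (L : List (Int × ρ)) (x : Int × ρ) (hx : x.1 ∈ ks) :
    PySem.List.insertBy (fun a b => decide (b.1 < a.1)) x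
        (ks.flatMap (fun k => L.filter (fun p => p.1 = k)))
      = ks.flatMap (fun k => (L ++ [x]).filter (fun p => p.1 = k)) := by
  induction ks with
  | nil => simp at hx
  | cons k ks ih =>
    have hlt : ∀ u ∈ ks, u < k := (List.pairwise_cons.mp hks).1
    have hfx : ∀ u : Int, (List.filter (fun p => decide (p.1 = u)) (L ++ [x]))
        = L.filter (fun p => p.1 = u) ++ (if x.1 = u then [x] else []) := by
      intro u; rw [List.filter_append]; congr 1; by_cases h : x.1 = u <;> simp [h]
    by_cases hxk : x.1 = k
    · have h1 : ∀ y ∈ L.filter (fun p => decide (p.1 = k)),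
          (fun a b : Int × ρ => decide (b.1 < a.1)) x y = false := by
        intro y hy
        have : y.1 = k := by simpa using (List.mem_filter.mp hy).2
        simp [this, hxk]
      have h2 : ∀ z ∈ ks.flatMap (fun k => L.filter (fun p => decide (p.1 = k))),
          (fun a b : Int × ρ => decide (b.1 < a.1)) x z = true := by
        intro z hz
        rcases List.mem_flatMap.mp hz with ⟨u, hu, hzu⟩
        have hzu1 : z.1 = u := by simpa using (List.mem_filter.mp hzu).2
        simp only [decide_eq_true_eq, hzu1, hxk]
        exact hlt u hu
      have htail : ks.flatMap (fun u => (L ++ [x]).filter (fun p => decide (p.1 = u)))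
          = ks.flatMap (fun u => L.filter (fun p => decide (p.1 = u))) := by
        refine List.flatMap_congr ?_
        intro u hu
        rw [hfx u]
        have : x.1 ≠ u := by have := hlt u hu; omega
        simp [this]
      simp only [List.flatMap_cons]
      rw [pv_insertBy_append _ _ _ _ h1, pv_insertBy_front _ _ _ h2, htail, hfx k]
      simp [hxk]
    · have hx' : x.1 ∈ ks := (List.mem_cons.mp hx).resolve_left hxk
      have h1 : ∀ y ∈ L.filter (fun p => decide (p.1 = k)),
          (fun a b : Int × ρ => decide (b.1 < a.1)) x y = false := by
        intro y hy
        have hy1 : y.1 = k := by simpa using (List.mem_filter.mp hy).2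
        have : x.1 < k := hlt _ hx'
        simp only [decide_eq_false_iff_not, hy1]; omega
      simp only [List.flatMap_cons]
      rw [pv_insertBy_append _ _ _ _ h1, ih (List.pairwise_cons.mp hks).2 hx', hfx k]
      simp [hxk]

-- Python's stable reverse sort by key, when all keys lie in a strictly descending key list,
-- is the concatenation of the scan-order buckets in that key order
theorem pv_sorted_rev_eq_flatMap {ρ : Type} (ks : List Int) (hks : ks.Pairwise (fun a b => b < a))
    (L : List (Int × ρ)) (hL : ∀ p ∈ L, p.1 ∈ ks) :
    PySem.List.sorted L (fun p => p.1) true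
      = ks.flatMap (fun k => L.filter (fun p => p.1 = k)) := by
  induction L using List.reverseRecOn with
  | nil => simp [PySem.List.sorted]
  | append_singleton L x ih =>
    rw [PySem.List.sorted_rev_eq_foldl_insertBy, List.foldl_append]
    simp only [List.foldl_cons, List.foldl_nil]
    rw [← PySem.List.sorted_rev_eq_foldl_insertBy]
    rw [ih (fun p hp => hL p (by simp [hp]))]
    exact pv_insertBy_flatMap ks hks L x (hL x (by simp))

theorem pv_map_slice {α β : Type} (g : α → β) (L : List α) (a? b? : Option Int) :
    (PySem.List.slice L a? b?).map g = PySem.List.slice (L.map g) a? b? := by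
  simp [PySem.List.slice, List.map_take, List.map_drop]

theorem pv_sum_ite_le (l : List (List Char)) (jd : List Char) :
    (l.map (fun s => if PySem.Chars.isIn s jd then (1 : Int) else 0)).sum ≤ l.length := by
  induction l with
  | nil => simp
  | cons s l ih =>
    simp only [List.map_cons, List.sum_cons, List.length_cons]
    split_ifs <;> push_cast <;> omega

-- the overlap count never exceeds the number of skills
theorem pv_G_le (skills : List String) (t : List Char) :
    pvG skills t ≤ (skills.length : Int) := by
  simpa [pvG] using pv_sum_ite_le (skills.map (fun s => PySem.Chars.lower s.toList)) t

theorem pv_ks_form (n : Nat) :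
    PySem.List.pyRange (n : Int) 0 (-1) = (List.range n).map (fun j : Nat => (n : Int) - (j : Int)) := by
  have h : ((n : Int) - 0).toNat = n := by omega
  rw [PySem.List.pyRange_neg_one, h]

theorem pv_ks_pairwise (n : Nat) :
    (PySem.List.pyRange (n : Int) 0 (-1)).Pairwise (fun a b => b < a) := by
  rw [pv_ks_form, List.pairwise_map]
  exact List.pairwise_lt_range.imp (by intro a b h; omega)

theorem pv_mem_ks (n : Nat) (v : Int) (h1 : 0 < v) (h2 : v ≤ (n : Int)) :
    v ∈ PySem.List.pyRange (n : Int) 0 (-1) := by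
  rw [pv_ks_form, List.mem_map]
  refine ⟨((n : Int) - v).toNat, List.mem_range.mpr (by omega), by omega⟩

theorem pv_ks_ge (n : Nat) (k : Int) (hk : k ∈ PySem.List.pyRange (n : Int) 0 (-1)) : 1 ≤ k := by
  rw [pv_ks_form, List.mem_map] at hk
  rcases hk with ⟨j, hj, rfl⟩
  have := List.mem_range.mp hj
  omega

-- A's score-and-stable-reverse-sort pipeline, projected to rows, is the descending bucket concatenation
theorem pv_bucket_A {ρ : Type} (f : ρ → Int) (rows : List ρ) (n : Nat)
    (hub : ∀ r, f r ≤ (n : Int)) :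
    (PySem.List.sorted
        (rows.foldl (fun acc row => if 0 < f row then acc ++ [(f row, row)] else acc) [])
        (fun x => x.1) true).map (fun p => p.2)
      = (PySem.List.pyRange (n : Int) 0 (-1)).flatMap
          (fun k => rows.filter (fun r => decide (f r = k))) := by
  have hfun : (fun (acc : List (Int × ρ)) row =>
      if 0 < f row then acc ++ [(f row, row)] else acc)
      = (fun acc row => if (fun r => decide (0 < f r)) row = true
          then acc ++ [(fun r => (f r, r)) row] else acc) := by
    funext acc row; simp
  rw [hfun, PySem.List.foldl_append_if, List.nil_append]
  rw [pv_sorted_rev_eq_flatMap _ (pv_ks_pairwise n) _ (by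
    intro p hp
    rcases List.mem_map.mp hp with ⟨r, hr, rfl⟩
    have h0 : 0 < f r := by simpa using (List.mem_filter.mp hr).2
    exact pv_mem_ks n _ h0 (hub r))]
  rw [List.map_flatMap]
  refine List.flatMap_congr ?_
  intro k hk
  rw [List.filter_map, List.map_map]
  have h1 : ((fun p : Int × ρ => decide (p.1 = k)) ∘ fun r => (f r, r))
      = fun r => decide (f r = k) := by funext r; simp
  rw [h1, List.filter_filter]
  have hcong : List.filter (fun a => decide (f a = k) && decide (0 < f a)) rows
      = List.filter (fun r => decide (f r = k)) rows := by
    refine List.filter_congr ?_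
    intro r _
    by_cases h : f r = k
    · have := pv_ks_ge n k hk
      simp only [h, decide_true, Bool.true_and, decide_eq_true_eq]
      omega
    · simp [h]
  rw [hcong]
  simp [Function.comp_def]

-- B's descending selection sweeps over (rows, counts) build the same descending bucket concatenation
theorem pv_bucket_B {ρ : Type} (f : ρ → Int) (rows : List ρ) (counts : List Int) (n : Nat)
    (hcounts : counts = rows.map f) :
    (PySem.List.pyRange (n : Int) 0 (-1)).foldl
        (fun acc k => (rows.zip counts).foldl
          (fun acc2 p => if p.2 = k then acc2 ++ [p.1] else acc2) acc) []
      = (PySem.List.pyRange (n : Int) 0 (-1)).flatMap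
          (fun k => rows.filter (fun r => decide (f r = k))) := by
  subst hcounts
  have hzip : rows.zip (rows.map f) = rows.map (fun r => (r, f r)) := by
    have := @List.zip_map' _ _ _ id f rows
    simpa using this
  have hinner : (fun (acc : List ρ) (k : Int) =>
      (rows.zip (rows.map f)).foldl
        (fun acc2 p => if p.2 = k then acc2 ++ [p.1] else acc2) acc)
      = (fun acc k => acc ++ (rows.filter (fun r => decide (f r = k)))) := by
    funext acc k
    have hfun : (fun (acc2 : List ρ) (p : ρ × Int) =>
        if p.2 = k then acc2 ++ [p.1] else acc2)
        = (fun acc2 p => if (fun q : ρ × Int => decide (q.2 = k)) p = true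
            then acc2 ++ [(fun q : ρ × Int => q.1) p] else acc2) := by
      funext acc2 p; simp
    rw [hzip, hfun, PySem.List.foldl_append_if, List.filter_map, List.map_map]
    simp [Function.comp_def]
  rw [hinner, PySem.List.foldl_append_eq_flatMap, List.nil_append]

theorem skill_prefilter_py_spec_aux (rows : List (List (String × String)))
    (resume_skills : List String) (jd_col sk_col : String) (top_n : Int) :
    skill_prefilter_py rows resume_skills jd_col sk_col top_n
      = skill_prefilter_py_alt rows resume_skills jd_col sk_col top_n := by
  by_cases hrs : resume_skills = []
  · simp [skill_prefilter_py, skill_prefilter_py_alt, hrs]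
  · simp only [skill_prefilter_py, skill_prefilter_py_alt, if_neg hrs]
    -- B's counts list equals the per-row overlap counts
    have hc : resume_skills.foldl (fun cs s =>
          ((rows.map (fun row => PySem.Chars.lower
            (((PySem.Dict.mk row).getD jd_col "").toList ++
              (' ' :: ((PySem.Dict.mk row).getD sk_col "").toList)))).zip cs).map
            (fun p => if PySem.Chars.isIn (PySem.Chars.lower s.toList) p.1 then p.2 + 1 else p.2))
        (List.replicate rows.length (0 : Int))
        = rows.map (fun row => pvG resume_skills (PySem.Chars.lower
            (((PySem.Dict.mk row).getD jd_col "").toList ++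
              (' ' :: ((PySem.Dict.mk row).getD sk_col "").toList)))) := by
      rw [pv_counts_eq _ _ _ (by simp)]
      rw [show rows.length = (rows.map (fun row => PySem.Chars.lower
            (((PySem.Dict.mk row).getD jd_col "").toList ++
              (' ' :: ((PySem.Dict.mk row).getD sk_col "").toList)))).length by simp]
      rw [pv_zip_replicate, List.map_map, List.map_map]
      simp
    have hA := pv_bucket_A (fun row => pvG resume_skills (PySem.Chars.lower
        (((PySem.Dict.mk row).getD jd_col "").toList ++
          (' ' :: ((PySem.Dict.mk row).getD sk_col "").toList))))
      rows resume_skills.length (fun r => pv_G_le resume_skills _)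
    have hB := pv_bucket_B (fun row => pvG resume_skills (PySem.Chars.lower
        (((PySem.Dict.mk row).getD jd_col "").toList ++
          (' ' :: ((PySem.Dict.mk row).getD sk_col "").toList))))
      rows _ resume_skills.length hc
    simp only [pvG] at hA hB
    rw [pv_map_slice, hA, hB]
-- ===== VERDICT (by name: the statement is the Claim_ definition above) =====
theorem skill_prefilter_py_spec : Claim_equal_skill_prefilter_py := by
  intro rows resume_skills jd_col sk_col top_n _
  unfold Spec_skill_prefilter_py
  exact skill_prefilter_py_spec_aux rows resume_skills jd_col sk_col top_n
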